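-- pv_equiv track=rewrite | github.com/Jong-youn/algorithm_space | problem solving/programmers/binary_search1.py | solution
-- ===== SOURCE A (Python) =====
-- def solution(n, times):
--     mx = max(times)*n
--     mn = 1
--
--     while mn <= mx:
--         md = (mx+mn)//2
--         result = 0
--         for time in times:
--             result += md//time
--         if result >= n:
--             res = md
--             mx = md-1
--         elif result < n:
--             mn = md+1
--
--     return res
-- ===== SOURCE B (Python) =====
-- def solution(n, times):
--     # Recursive invariant bisection on the half-open interval (lo, hi]:
--     # completed(lo) < n <= completed(hi) throughout, so hi is the answer
--     # once the interval is a single point.  min(times)*n is already a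
--     # valid upper bound (min(times)*n // min(times) == n).
--     def completed(T):
--         return sum(T // t for t in times)
--
--     def find(lo, hi):
--         if lo + 1 == hi:
--             return hi
--         mid = (lo + hi) // 2
--         if completed(mid) < n:
--             return find(mid, hi)
--         return find(lo, mid)
--
--     return find(0, min(times) * n)
-- ===== Notes on version B (the rewrite author's own statement) =====
-- stated objective: simpler
-- what changed: Replaces A's iterative closed-interval search with best-so-far res bookkeeping and max(times)*n bound by a short recursive half-open invariant bisection over (0, min(times)*n] that returns hi when the interval is a single point.
-- outside the precondition, e.g. on solution(-6, [-1, -17]): A returns 1, B returns 102; on solution(12, [1, -16, -7, -17, 27]): A returns 19, B raises RecursionError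
import Mathlib
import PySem

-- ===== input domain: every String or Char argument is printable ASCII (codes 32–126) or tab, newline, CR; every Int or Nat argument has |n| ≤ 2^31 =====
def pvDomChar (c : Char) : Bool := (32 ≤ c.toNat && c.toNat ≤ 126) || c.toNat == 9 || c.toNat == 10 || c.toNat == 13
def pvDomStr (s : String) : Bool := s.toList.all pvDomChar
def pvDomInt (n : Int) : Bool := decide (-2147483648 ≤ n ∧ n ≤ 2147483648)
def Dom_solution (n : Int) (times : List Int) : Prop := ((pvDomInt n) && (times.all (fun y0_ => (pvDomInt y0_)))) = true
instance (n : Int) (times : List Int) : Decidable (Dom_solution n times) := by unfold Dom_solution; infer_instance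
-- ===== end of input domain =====

-- B replaces A's iterative closed-interval search with best-so-far bookkeeping by a
-- recursive half-open invariant bisection over (0, min(times)*n] (objective: simpler).


-- ===== PORT A =====
-- the while loop of A; res is Option because Python's `res` may be unbound
-- (returning with res unbound raises UnboundLocalError → excluded by Pre_).
-- fuel is a totality device only: it starts at the interval length, which the
-- loop strictly shrinks, so fuel never runs out on the Python-reachable states.
def solutionLoop : Nat → Int → List Int → Int → Int → Option Int → Option Int
  | 0, _, _, _, _, res => res
  | fuel + 1, n, times, mn, mx, res =>
    if mn ≤ mx then
      let md := PySem.Int.floordiv (mx + mn) 2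
      let result := times.foldl (fun result time => result + PySem.Int.floordiv md time) 0
      if result ≥ n then
        solutionLoop fuel n times mn (md - 1) (some md)
      else
        solutionLoop fuel n times (md + 1) mx res
    else res

def solution (n : Int) (times : List Int) : Int :=
  let mx := ((PySem.List.max? times (fun x => x)).getD 0) * n
  (solutionLoop mx.toNat n times 1 mx none).getD 0

-- ===== PORT B =====
def solutionAltCompleted (times : List Int) (T : Int) : Int :=
  (times.map (fun t => PySem.Int.floordiv T t)).sum

-- the recursive bisection `find`; fuel is a totality device only: it starts at the
-- interval length, which every recursive call strictly shrinks, so it never runs out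
-- on the inputs where the Python recursion returns
def solutionAltFind : Nat → Int → List Int → Int → Int → Int
  | 0, _, _, _, hi => hi
  | fuel + 1, n, times, lo, hi =>
    if lo + 1 = hi then hi
    else
      let mid := PySem.Int.floordiv (lo + hi) 2
      if solutionAltCompleted times mid < n then solutionAltFind fuel n times mid hi
      else solutionAltFind fuel n times lo mid

def solution_alt (n : Int) (times : List Int) : Int :=
  let hi := ((PySem.List.min? times (fun x => x)).getD 0) * n
  solutionAltFind hi.toNat n times 0 hi

-- ===== PRECONDITION & SPEC =====
-- Pre_ is the problem's natural domain (at least one person, a nonempty list of positive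
-- taxi times): outside it A almost always raises (ValueError on an empty list,
-- ZeroDivisionError on a zero time, UnboundLocalError when the search range is empty or
-- never succeeds), and on the remaining inputs (nonpositive n or some nonpositive times)
-- the count T//t is not monotone, no answer is specified, and A's and B's searches return
-- different, equally meaningless artefacts.
def Pre_solution (n : Int) (times : List Int) : Prop :=
  1 ≤ n ∧ times ≠ [] ∧ ∀ t ∈ times, 1 ≤ t
instance (n : Int) (times : List Int) : Decidable (Pre_solution n times) := by
  unfold Pre_solution; infer_instance

def pvWitness_solution : Int × List Int := (3, [2, 1, 5])

def Spec_solution (n : Int) (times : List Int) (out : Int) : Prop := out = solution_alt n times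
instance (n : Int) (times : List Int) (out : Int) : Decidable (Spec_solution n times out) := by unfold Spec_solution; infer_instance

-- ===== CLAIM (what is proved, stated in full; the proofs are below) =====
def Claim_equal_solution : Prop := ∀ (n : Int) (times : List Int), Dom_solution n times → Pre_solution n times → Spec_solution n times (solution n times)

-- ===== LEMMAS AND PROOFS =====

-- the shared counting sum, monotone in T when all divisors are positive
lemma pvFold_mono (times : List Int) (hts : ∀ t ∈ times, 1 ≤ t) (T U a b : Int)
    (hab : a ≤ b) (hTU : T ≤ U) :
    times.foldl (fun s t => s + PySem.Int.floordiv T t) a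
      ≤ times.foldl (fun s t => s + PySem.Int.floordiv U t) b := by
  induction times generalizing a b with
  | nil => simpa
  | cons hd tl ih =>
    have hhd : 1 ≤ hd := hts hd (by simp)
    simp only [List.foldl_cons]
    refine ih (fun t ht => hts t (by simp [ht])) _ _ ?_ 
    rw [PySem.Int.floordiv_eq_ediv_of_pos (by omega : 0 < hd),
        PySem.Int.floordiv_eq_ediv_of_pos (by omega : 0 < hd)]
    exact add_le_add hab (Int.ediv_le_ediv (by omega) hTU)

lemma pvFold_nonpos (times : List Int) (hts : ∀ t ∈ times, 1 ≤ t) (T a : Int) (hT : T ≤ 0) :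
    times.foldl (fun s t => s + PySem.Int.floordiv T t) a ≤ a := by
  induction times generalizing a with
  | nil => simp
  | cons hd tl ih =>
    have hhd : 1 ≤ hd := hts hd (by simp)
    simp only [List.foldl_cons]
    have h1 : PySem.Int.floordiv T hd ≤ 0 := by
      rw [PySem.Int.floordiv_eq_ediv_of_pos (by omega : 0 < hd)]
      have := Int.ediv_le_ediv (c := hd) (by omega) hT
      simpa using this
    calc tl.foldl (fun s t => s + PySem.Int.floordiv T t) (a + PySem.Int.floordiv T hd)
        ≤ a + PySem.Int.floordiv T hd := ih (fun t ht => hts t (by simp [ht])) _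
      _ ≤ a := by omega

lemma pvFold_ge_acc (times : List Int) (hts : ∀ t ∈ times, 1 ≤ t) (T a : Int) (hT : 0 ≤ T) :
    a ≤ times.foldl (fun s t => s + PySem.Int.floordiv T t) a := by
  induction times generalizing a with
  | nil => simp
  | cons hd tl ih =>
    have hhd : 1 ≤ hd := hts hd (by simp)
    simp only [List.foldl_cons]
    have h1 : 0 ≤ PySem.Int.floordiv T hd := by
      rw [PySem.Int.floordiv_eq_ediv_of_pos (by omega : 0 < hd)]
      exact Int.ediv_nonneg hT (by omega)
    calc a ≤ a + PySem.Int.floordiv T hd := by omega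
      _ ≤ _ := ih (fun t ht => hts t (by simp [ht])) _

lemma pvFold_mem (times : List Int) (hts : ∀ t ∈ times, 1 ≤ t) (m : Int) (hm : m ∈ times)
    (T a : Int) (hT : 0 ≤ T) :
    a + PySem.Int.floordiv T m ≤ times.foldl (fun s t => s + PySem.Int.floordiv T t) a := by
  induction times generalizing a with
  | nil => simp at hm
  | cons hd tl ih =>
    have hhd : 1 ≤ hd := hts hd (by simp)
    simp only [List.foldl_cons]
    rcases List.mem_cons.mp hm with h | h
    · subst h
      exact pvFold_ge_acc tl (fun t ht => hts t (by simp [ht])) T _ hT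
    · have h1 : 0 ≤ PySem.Int.floordiv T hd := by
        rw [PySem.Int.floordiv_eq_ediv_of_pos (by omega : 0 < hd)]
        exact Int.ediv_nonneg hT (by omega)
      calc a + PySem.Int.floordiv T m ≤ (a + PySem.Int.floordiv T hd) + PySem.Int.floordiv T m := by omega
        _ ≤ _ := ih (fun t ht => hts t (by simp [ht])) h _

-- A's loop returns `some L` whenever L is the least T with count T ≥ n and the invariant holds
lemma pvLoopA (n : Int) (times : List Int) (hts : ∀ t ∈ times, 1 ≤ t) (L : Int)
    (hL : n ≤ times.foldl (fun s t => s + PySem.Int.floordiv L t) 0)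
    (hmin : ∀ z, n ≤ times.foldl (fun s t => s + PySem.Int.floordiv z t) 0 → L ≤ z) :
    ∀ (k : Nat) (mn mx : Int) (res : Option Int), (mx + 1 - mn).toNat ≤ k → 1 ≤ mn → mn ≤ L →
      (mx < L → res = some L) → solutionLoop k n times mn mx res = some L := by
  intro k
  induction k with
  | zero =>
    intro mn mx res hk h1 h2 h3
    exact h3 (by omega)
  | succ k ih =>
    intro mn mx res hk h1 h2 h3
    rw [solutionLoop]
    by_cases hle : mn ≤ mx
    · simp only [hle, if_true]
      have hmd := PySem.Int.floordiv_two_mid_bounds hle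
      rw [show mn + mx = mx + mn by ring] at hmd
      set md := PySem.Int.floordiv (mx + mn) 2 with hmddef
      by_cases hsat : times.foldl (fun s t => s + PySem.Int.floordiv md t) 0 ≥ n
      · simp only [hsat, if_true]
        have hLmd : L ≤ md := hmin md hsat
        exact ih mn (md - 1) (some md) (by omega) h1 h2
          (fun hlt => by have : L = md := by omega
                         rw [this])
      · simp only [hsat, if_false]
        -- ¬ count md ≥ n forces md < L (count is monotone and count L ≥ n)
        have hmdL : md < L := by
          by_contra hcon
          exact hsat (le_trans hL (pvFold_mono times hts L md 0 0 le_rfl (by omega)))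
        exact ih (md + 1) mx res (by omega) (by omega) (by omega) h3
    · simp only [hle, if_false]
      exact h3 (by omega)

-- B's completed() is the same counting sum A folds up
lemma pvCompleted_eq (times : List Int) (T : Int) :
    solutionAltCompleted times T = times.foldl (fun s t => s + PySem.Int.floordiv T t) 0 := by
  rw [solutionAltCompleted, List.sum_eq_foldl, List.foldl_map]

-- B's bisection returns L under its invariant completed lo < n ≤ completed hi
lemma pvFind (n : Int) (times : List Int) (hts : ∀ t ∈ times, 1 ≤ t) (L : Int)
    (hL : n ≤ times.foldl (fun s t => s + PySem.Int.floordiv L t) 0)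
    (hmin : ∀ z, n ≤ times.foldl (fun s t => s + PySem.Int.floordiv z t) 0 → L ≤ z) :
    ∀ (fuel : Nat) (lo hi : Int), lo < hi → hi - lo ≤ (fuel : Int) →
      ¬ n ≤ times.foldl (fun s t => s + PySem.Int.floordiv lo t) 0 →
      n ≤ times.foldl (fun s t => s + PySem.Int.floordiv hi t) 0 →
      solutionAltFind fuel n times lo hi = L := by
  intro fuel
  induction fuel with
  | zero =>
    intro lo hi hlt hfuel _ _
    exact absurd hfuel (by push_cast; omega)
  | succ fuel ih =>
    intro lo hi hlt hfuel hlo hhi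
    have hloL : lo < L := by
      by_contra hcon
      exact hlo (le_trans hL (pvFold_mono times hts L lo 0 0 le_rfl (by omega)))
    have hLhi : L ≤ hi := hmin hi hhi
    rw [solutionAltFind]
    by_cases hunit : lo + 1 = hi
    · simp only [hunit, if_true]
      omega
    · simp only [hunit, if_false]
      have hlen : lo + 2 ≤ hi := by omega
      have hmd := PySem.Int.floordiv_two_mid_bounds (by omega : lo + 1 ≤ hi - 1)
      rw [show lo + 1 + (hi - 1) = lo + hi by ring] at hmd
      set mid := PySem.Int.floordiv (lo + hi) 2 with hmiddef
      rw [pvCompleted_eq]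
      by_cases hc : times.foldl (fun s t => s + PySem.Int.floordiv mid t) 0 < n
      · simp only [hc, if_true]
        exact ih mid hi (by omega) (by push_cast at hfuel ⊢; omega) (by omega) hhi
      · simp only [hc, if_false]
        exact ih lo mid (by omega) (by push_cast at hfuel ⊢; omega) hlo (by omega)

-- ===== VERDICT (by name: the statement is the Claim_ definition above) =====
theorem solution_spec : Claim_equal_solution := by
  intro n times _hdom hpre
  obtain ⟨hn, hne, hts⟩ := hpre
  unfold Spec_solution solution solution_alt
  -- the maximum and minimum elements of times
  obtain ⟨M, hM⟩ : ∃ M, PySem.List.max? times (fun x => x) = some M := by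
    cases hmx : PySem.List.max? times (fun x => x) with
    | none => exact absurd ((PySem.List.max?_eq_none_iff times (fun x => x)).mp hmx) hne
    | some m => exact ⟨m, rfl⟩
  obtain ⟨m, hm⟩ : ∃ m, PySem.List.min? times (fun x => x) = some m := by
    cases hmn : PySem.List.min? times (fun x => x) with
    | none => exact absurd ((PySem.List.min?_eq_none_iff times (fun x => x)).mp hmn) hne
    | some v => exact ⟨v, rfl⟩
  have hMmem : M ∈ times := PySem.List.max?_mem hM
  have hM1 : 1 ≤ M := hts M hMmem
  have hmmem : m ∈ times := PySem.List.min?_mem hm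
  have hm1 : 1 ≤ m := hts m hmmem
  rw [hM, hm]
  simp only [Option.getD_some]
  -- both bounds satisfy the count condition
  have hsat : ∀ c : Int, c ∈ times → 1 ≤ c →
      n ≤ times.foldl (fun s t => s + PySem.Int.floordiv (c * n) t) 0 := by
    intro c hcmem hc1
    have hcn1 : 1 ≤ c * n := by nlinarith
    have := pvFold_mem times hts c hcmem (c * n) 0 (by omega)
    have hdiv : PySem.Int.floordiv (c * n) c = n := by
      rw [PySem.Int.floordiv_eq_ediv_of_pos (by omega : 0 < c),
          Int.mul_ediv_cancel_left _ (by omega)]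
    omega
  -- the least T with count T ≥ n
  obtain ⟨L, hL, hmin⟩ := Int.exists_least_of_bdd
    (P := fun z => n ≤ times.foldl (fun s t => s + PySem.Int.floordiv z t) 0)
    ⟨1, fun z hz => by
      by_contra hcon
      have := pvFold_nonpos times hts z 0 (by omega)
      omega⟩
    ⟨M * n, hsat M hMmem hM1⟩
  have hL1 : 1 ≤ L := by
    by_contra hcon
    have := pvFold_nonpos times hts L 0 (by omega)
    omega
  -- A's side
  have hLhiA : L ≤ M * n := hmin _ (hsat M hMmem hM1)
  have hA : solutionLoop (M * n).toNat n times 1 (M * n) none = some L :=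
    pvLoopA n times hts L hL hmin (M * n).toNat 1 (M * n) none (by omega) le_rfl hL1
      (fun hlt => by omega)
  rw [hA]
  simp only [Option.getD_some]
  -- B's side
  have hhi1 : 1 ≤ m * n := by nlinarith
  refine (pvFind n times hts L hL hmin (m * n).toNat 0 (m * n) (by omega) (by omega) ?_
    (hsat m hmmem hm1)).symm
  intro hcon
  have := pvFold_nonpos times hts 0 0 le_rfl
  omega
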